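-- pv_equiv track=rewrite | github.com/rfemd/pl_tests | task 1/task1.py | func
-- ===== SOURCE A (Python) =====
-- def func(n, m):
-- 	arr = []
-- 	for i in range(1,n+1):
-- 		arr.append(i)
--
-- 	res=""
-- 	i = 0
-- 	while True:
-- 		res+=str(arr[i])
-- 		i = i + m -1
-- 		i %= n
-- 		if arr[i]== arr[0]:
-- 			return res
-- ===== SOURCE B (Python) =====
-- def func(n, m):
--     arr = list(range(1, n + 1))
--     parts = [str(arr[0])]
--     step = (m - 1) % n
--     g, r = n, step
--     while r:
--         g, r = r, g % r
--     period = n // g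
--     for k in range(1, period):
--         parts.append(str(arr[(k * step) % n]))
--     return "".join(parts)
-- ===== Notes on version B (the rewrite author's own statement) =====
-- stated objective: alternative
-- what changed: B computes the orbit length analytically as n // gcd(n, (m-1)%n) and emits the k-th element by direct index arithmetic (k*step)%n over a for-range, instead of A's while-True walk that detects the return to the start element.
import Mathlib
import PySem

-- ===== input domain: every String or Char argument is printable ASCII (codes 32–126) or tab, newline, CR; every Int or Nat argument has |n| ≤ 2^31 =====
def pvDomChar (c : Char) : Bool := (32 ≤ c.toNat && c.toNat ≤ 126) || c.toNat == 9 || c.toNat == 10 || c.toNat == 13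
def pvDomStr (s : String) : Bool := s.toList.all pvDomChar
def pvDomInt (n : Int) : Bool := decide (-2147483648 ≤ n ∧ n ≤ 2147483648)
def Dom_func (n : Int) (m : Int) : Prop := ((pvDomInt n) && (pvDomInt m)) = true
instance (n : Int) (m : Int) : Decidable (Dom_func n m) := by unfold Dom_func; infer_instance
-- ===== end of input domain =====

-- B replaces A's while-True walk (stop when the start element reappears) by the closed-form
-- orbit length n // gcd(n, (m-1)%n) and direct index arithmetic (k*step)%n; same return value.

-- ===== PORT A =====
-- the while-True loop of A; fuel is only an upper bound on iterations (the loop returns within n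
-- steps under Pre_); arr[i]/arr[0] use pyGetD, exact because Pre_ keeps every index in range
def funcLoop (arr : List Int) (n m : Int) : Nat → Int → String → String
  | 0, _, res => res
  | fuel+1, i, res =>
    let res' := res ++ PySem.Int.toStr (PySem.List.pyGetD arr i 0)
    let i' := PySem.Int.mod (i + m - 1) n
    if PySem.List.pyGetD arr i' 0 == PySem.List.pyGetD arr 0 0 then res'
    else funcLoop arr n m fuel i' res'

def func (n : Int) (m : Int) : String :=
  let arr := PySem.List.pyRange 1 (n + 1) 1
  funcLoop arr n m (n.toNat + 1) 0 ""

-- ===== PORT B =====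
-- Source B's hand-written Euclid loop (called with nonnegative ints only)
def euclid : Nat → Nat → Nat
  | g, 0 => g
  | g, (r+1) => euclid (r+1) (g % (r+1))
  decreasing_by exact Nat.mod_lt _ (Nat.succ_pos r)

def func_alt (n : Int) (m : Int) : String :=
  let arr := PySem.List.pyRange 1 (n + 1) 1
  let first := PySem.Int.toStr (PySem.List.pyGetD arr 0 0)
  let step := PySem.Int.mod (m - 1) n
  let period := PySem.Int.floordiv n ((euclid n.toNat step.toNat : Nat) : Int)
  PySem.Str.join "" (first ::
    (PySem.List.pyRange 1 period 1).map
      (fun k => PySem.Int.toStr (PySem.List.pyGetD arr (PySem.Int.mod (k * step) n) 0)))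

-- ===== PRECONDITION & SPEC =====
-- Pre_ excludes exactly n ≤ 0, where the Python A raises IndexError on arr[0] (arr is empty);
-- B raises IndexError there too.
def Pre_func (n : Int) (m : Int) : Prop := 1 ≤ n
instance (n : Int) (m : Int) : Decidable (Pre_func n m) := by unfold Pre_func; infer_instance
def pvWitness_func : Int × Int := (6, 3)

def Spec_func (n : Int) (m : Int) (out : String) : Prop := out = func_alt n m
instance (n : Int) (m : Int) (out : String) : Decidable (Spec_func n m out) := by unfold Spec_func; infer_instance

-- ===== CLAIM (what is proved, stated in full; the proofs are below) =====
def Claim_equal_func : Prop := ∀ (n : Int) (m : Int), Dom_func n m → Pre_func n m → Spec_func n m (func n m)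

-- ===== LEMMAS AND PROOFS =====

-- index of the k-th visited cell: (k * ((m-1) % n)) % n  (Int.emod; = Python % for n > 0)
def pvIdx (n m : Int) (k : Nat) : Int := ((k : Int) * ((m - 1) % n)) % n

-- concatenation of f k, f (k+1), …, f (k+c-1)
def catFrom (f : Nat → String) : Nat → Nat → String
  | _, 0 => ""
  | k, c+1 => f k ++ catFrom f (k+1) c

theorem euclid_eq_gcd : ∀ a b : Nat, euclid a b = Nat.gcd b a := by
  intro a b
  induction a, b using euclid.induct with
  | case1 g => simp [euclid]
  | case2 g r ih => rw [euclid, ih]; exact (Nat.gcd_rec (r+1) g).symm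

theorem dvd_mul_iff_div_gcd_dvd (N sN : Nat) (hN : 0 < N) (k : Nat) :
    N ∣ k * sN ↔ (N / Nat.gcd N sN) ∣ k := by
  set g := Nat.gcd N sN with hg0
  have hg : 0 < g := Nat.gcd_pos_of_pos_left _ hN
  obtain ⟨N', hN'⟩ : g ∣ N := Nat.gcd_dvd_left N sN
  obtain ⟨s', hs'⟩ : g ∣ sN := Nat.gcd_dvd_right N sN
  have hNg : N / g = N' := by rw [hN']; exact Nat.mul_div_cancel_left _ hg
  have hsg : sN / g = s' := by rw [hs']; exact Nat.mul_div_cancel_left _ hg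
  have hco : Nat.Coprime N' s' := by
    have := Nat.coprime_div_gcd_div_gcd (m := N) (n := sN) hg
    rwa [← hg0, hNg, hsg] at this
  rw [hNg]
  constructor
  · intro h
    have h' : g * N' ∣ g * (k * s') := by
      rw [← hN']
      calc N ∣ k * sN := h
        _ = g * (k * s') := by rw [hs']; ring
    exact hco.dvd_of_dvd_mul_right ((Nat.mul_dvd_mul_iff_left hg).mp h')
  · rintro ⟨c, rfl⟩
    exact ⟨s' * c, by rw [hN', hs']; ring⟩

theorem arr_val (n : Int) (hn : 1 ≤ n) (i : Int) (h0 : 0 ≤ i) (h1 : i < n) :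
    PySem.List.pyGetD (PySem.List.pyRange 1 (n + 1) 1) i 0 = i + 1 := by
  have hlen : PySem.List.len (PySem.List.pyRange 1 (n + 1) 1) = n := by
    rw [PySem.List.len_eq, PySem.List.length_pyRange_one]; omega
  rw [PySem.List.pyGetD_eq_getElem _ _ h0 (by rw [← PySem.List.len_eq, hlen]; exact h1)]
  rw [PySem.List.getElem_pyRange_one]
  omega

theorem pvIdx_nonneg (n m : Int) (hn : 1 ≤ n) (k : Nat) : 0 ≤ pvIdx n m k :=
  Int.emod_nonneg _ (by omega)

theorem pvIdx_lt (n m : Int) (hn : 1 ≤ n) (k : Nat) : pvIdx n m k < n :=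
  Int.emod_lt_of_pos _ (by omega)

theorem pvIdx_succ (n m : Int) (hn : 1 ≤ n) (k : Nat) :
    PySem.Int.mod (pvIdx n m k + m - 1) n = pvIdx n m (k + 1) := by
  rw [PySem.Int.mod_eq_emod_of_pos (show (0:Int) < n by omega)]
  rw [show pvIdx n m k + m - 1 = (k : Int) * ((m-1) % n) % n + (m - 1) by unfold pvIdx; ring]
  show _ = pvIdx n m (k+1)
  unfold pvIdx
  have e1 : ∀ a : Int, a % n % n = a % n := fun a => Int.emod_emod_of_dvd a dvd_rfl
  have key : ∀ a b : Int, (a % n + b) % n = (a + b) % n := by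
    intro a b
    conv_lhs => rw [Int.add_emod, e1]
    rw [← Int.add_emod]
  have key2 : ∀ a b : Int, (a + b % n) % n = (a + b) % n := by
    intro a b
    conv_lhs => rw [Int.add_emod, e1]
    rw [← Int.add_emod]
  calc ((k : Int) * ((m-1) % n) % n + (m - 1)) % n
      = ((k : Int) * ((m-1) % n) + (m - 1)) % n := key _ _
    _ = ((k : Int) * ((m-1) % n) + (m - 1) % n) % n := (key2 _ _).symm
    _ = (((k : Nat) + 1 : Int) * ((m-1) % n)) % n := by ring_nf

theorem pvIdx_eq_zero_iff (n m : Int) (hn : 1 ≤ n) (k : Nat) :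
    pvIdx n m k = 0 ↔ (n.toNat / Nat.gcd n.toNat ((m-1) % n).toNat) ∣ k := by
  have hs0 : 0 ≤ (m - 1) % n := Int.emod_nonneg _ (by omega)
  have hcast : ((m - 1) % n) = (((m-1) % n).toNat : Int) := by omega
  rw [show pvIdx n m k = ((k : Int) * ((m-1) % n)) % n from rfl]
  constructor
  · intro h
    have hdvd : n ∣ (k : Int) * ((m-1) % n) := Int.dvd_of_emod_eq_zero h
    have h2 : (n.toNat : Int) ∣ ((k * ((m-1) % n).toNat : Nat) : Int) := by
      push_cast
      rw [← hcast, show ((n.toNat : Nat) : Int) = n by omega]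
      exact hdvd
    exact (dvd_mul_iff_div_gcd_dvd _ _ (by omega) _).mp (Int.natCast_dvd_natCast.mp h2)
  · intro h
    have hdvd : n.toNat ∣ k * ((m-1) % n).toNat := (dvd_mul_iff_div_gcd_dvd _ _ (by omega) _).mpr h
    apply Int.emod_eq_zero_of_dvd
    have h2 : ((n.toNat : Nat) : Int) ∣ ((k * ((m-1) % n).toNat : Nat) : Int) := Int.natCast_dvd_natCast.mpr hdvd
    push_cast at h2
    rwa [← hcast, show ((n.toNat : Nat) : Int) = n by omega] at h2

theorem str_join_empty_cons (a : String) (l : List String) :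
    PySem.Str.join "" (a :: l) = a ++ PySem.Str.join "" l := by
  cases l with
  | nil =>
    show String.ofList ((List.intercalate [] [a.toList])) = _
    simp [List.intercalate, PySem.Str.join, PySem.Chars.join, String.ofList_toList]
  | cons b l => simp [PySem.Str.join, PySem.Chars.join_cons_cons]

theorem join_range_catFrom (f : Nat → String) :
    ∀ (c k : Nat), PySem.Str.join "" ((List.range c).map (fun j => f (k + j))) = catFrom f k c := by
  intro c
  induction c with
  | zero => intro k; simp [catFrom, PySem.Str.join, PySem.Chars.join, List.intercalate]
  | succ c ih =>
    intro k
    rw [List.range_succ_eq_map]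
    simp only [List.map_cons, List.map_map]
    rw [str_join_empty_cons]
    have : (fun j => f (k + j)) ∘ Nat.succ = (fun j => f ((k+1) + j)) := by
      funext j; simp [Function.comp]; congr 1; omega
    rw [this, ih (k+1)]
    rfl

theorem loop_run (n m : Int) (hn : 1 ≤ n)
    (p : Nat)
    (hzero : ∀ k : Nat, 0 < k → k ≤ p → (pvIdx n m k = 0 ↔ k = p)) :
    ∀ (fuel k : Nat) (res : String), k < p → p - k ≤ fuel →
      funcLoop (PySem.List.pyRange 1 (n + 1) 1) n m fuel (pvIdx n m k) res =
        res ++ catFrom (fun j => PySem.Int.toStr (PySem.List.pyGetD (PySem.List.pyRange 1 (n + 1) 1) (pvIdx n m j) 0)) k (p - k) := by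
  intro fuel
  induction fuel with
  | zero => intro k res hk hf; omega
  | succ fuel ih =>
    intro k res hk hf
    simp only [funcLoop]
    rw [pvIdx_succ n m hn k]
    rw [arr_val n hn _ (pvIdx_nonneg n m hn (k+1)) (pvIdx_lt n m hn (k+1))]
    rw [arr_val n hn 0 (by omega) (by omega)]
    by_cases hend : k + 1 = p
    · have hz : pvIdx n m (k+1) = 0 := (hzero (k+1) (by omega) (by omega)).mpr hend
      rw [hz]
      simp only [beq_self_eq_true, if_true]
      have : p - k = 1 := by omega
      rw [this]
      show res ++ _ = res ++ catFrom _ k 1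
      rw [catFrom, catFrom, String.append_empty]
    · have hz : pvIdx n m (k+1) ≠ 0 := fun h => hend ((hzero (k+1) (by omega) (by omega)).mp h)
      have hne : (pvIdx n m (k+1) + 1 == 0 + 1) = false := by
        simp only [beq_eq_false_iff_ne, ne_eq]
        omega
      rw [hne]
      simp only [Bool.false_eq_true, if_false]
      rw [ih (k+1) _ (by omega) (by omega)]
      have hsplit : p - k = (p - (k+1)) + 1 := by omega
      rw [hsplit, catFrom, String.append_assoc]

theorem pvP_pos (n m : Int) (hn : 1 ≤ n) : 0 < n.toNat / Nat.gcd n.toNat ((m-1) % n).toNat :=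
  Nat.div_pos (Nat.le_of_dvd (by omega) (Nat.gcd_dvd_left _ _)) (Nat.gcd_pos_of_pos_left _ (by omega))

theorem pvZero (n m : Int) (hn : 1 ≤ n) :
    ∀ k : Nat, 0 < k → k ≤ n.toNat / Nat.gcd n.toNat ((m-1) % n).toNat →
      (pvIdx n m k = 0 ↔ k = n.toNat / Nat.gcd n.toNat ((m-1) % n).toNat) := by
  intro k hk hkp
  rw [pvIdx_eq_zero_iff n m hn k]
  constructor
  · intro h; exact Nat.le_antisymm hkp (Nat.le_of_dvd hk h)
  · rintro rfl; exact dvd_rfl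

theorem func_eq_catFrom (n m : Int) (hn : 1 ≤ n) :
    func n m = catFrom (fun j => PySem.Int.toStr (PySem.List.pyGetD (PySem.List.pyRange 1 (n + 1) 1) (pvIdx n m j) 0)) 0
      (n.toNat / Nat.gcd n.toNat ((m-1) % n).toNat) := by
  have h := loop_run n m hn _ (pvZero n m hn) (n.toNat + 1) 0 "" (pvP_pos n m hn)
    (by have := Nat.div_le_self n.toNat (Nat.gcd n.toNat ((m-1) % n).toNat); omega)
  rw [show pvIdx n m 0 = 0 by simp [pvIdx]] at h
  unfold func
  rw [h, Nat.sub_zero, String.empty_append]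

theorem func_alt_eq_catFrom (n m : Int) (hn : 1 ≤ n) :
    func_alt n m = catFrom (fun j => PySem.Int.toStr (PySem.List.pyGetD (PySem.List.pyRange 1 (n + 1) 1) (pvIdx n m j) 0)) 0
      (n.toNat / Nat.gcd n.toNat ((m-1) % n).toNat) := by
  have hp := pvP_pos n m hn
  have hmod : PySem.Int.mod (m - 1) n = (m - 1) % n := PySem.Int.mod_eq_emod_of_pos (by omega)
  have hg : 0 < Nat.gcd n.toNat ((m-1) % n).toNat := Nat.gcd_pos_of_pos_left _ (by omega)
  simp only [func_alt, hmod]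
  rw [euclid_eq_gcd, Nat.gcd_comm]
  set g := Nat.gcd n.toNat ((m-1) % n).toNat with hgdef
  set arr := PySem.List.pyRange 1 (n + 1) 1 with harr
  rw [show PySem.Int.floordiv n ((g : Nat) : Int) = ((n.toNat / g : Nat) : Int) by
        rw [PySem.Int.floordiv_eq_ediv_of_pos (by exact_mod_cast hg), show n = ((n.toNat : Nat) : Int) by omega]
        exact (Int.natCast_div _ _).symm]
  set p := n.toNat / g with hpdef
  rw [PySem.List.pyRange_one]
  rw [show ((p : Int) - 1).toNat = p - 1 by omega]
  rw [List.map_map]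
  rw [show ((fun k => PySem.Int.toStr (PySem.List.pyGetD arr (PySem.Int.mod (k * ((m-1) % n)) n) 0)) ∘ (fun k : Nat => 1 + (k : Int)))
        = fun j : Nat => PySem.Int.toStr (PySem.List.pyGetD arr (pvIdx n m (1 + j)) 0) by
      funext j
      simp only [Function.comp]
      rw [PySem.Int.mod_eq_emod_of_pos (show (0:Int) < n by omega)]
      unfold pvIdx
      congr 2]
  rw [show PySem.Int.toStr (PySem.List.pyGetD arr 0 0) = PySem.Int.toStr (PySem.List.pyGetD arr (pvIdx n m 0) 0) by
      rw [show pvIdx n m 0 = 0 by simp [pvIdx]]]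
  rw [str_join_empty_cons, join_range_catFrom (fun j => PySem.Int.toStr (PySem.List.pyGetD arr (pvIdx n m j) 0)) (p - 1) 1]
  conv_rhs => rw [show p = (p - 1) + 1 by omega]
  rfl

-- ===== VERDICT (by name: the statement is the Claim_ definition above) =====
theorem func_spec : Claim_equal_func := by
  intro n m _hdom hpre
  unfold Spec_func
  rw [func_eq_catFrom n m hpre, func_alt_eq_catFrom n m hpre]
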